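-- pv_equiv track=rewrite | github.com/yangchung-py/lunchbot | src/main.py | group_time_ranges
-- ===== SOURCE A (Python) =====
-- def group_time_ranges(times):
--     """시간 리스트를 연속 구간으로 그룹화"""
--     if not times:
--         return []
--     sorted_times = sorted(times)
--     time_ranges = []
--     current_start = current_end = sorted_times[0]
--     for t in sorted_times[1:]:
--         if int(t.replace(':', '')) - int(current_end.replace(':', '')) == 100:
--             current_end = t
--         else:
--             time_ranges.append(f"{current_start}~{current_end}" if current_start != current_end else current_start)
--             current_start = current_end = t
--     time_ranges.append(f"{current_start}~{current_end}" if current_start != current_end else current_start)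
--     return time_ranges
-- ===== SOURCE B (Python) =====
-- def group_time_ranges(times):
--     """시간 리스트를 연속 구간으로 그룹화"""
--     s = sorted(times)
--     if len(s) < 2:
--         return s
--     keys = [int(t.replace(':', '')) for t in s]
--     flags = [True] + [b - a != 100 for a, b in zip(keys, keys[1:])]
--     starts = [i for i, f in enumerate(flags) if f]
--     ends = [i - 1 for i in starts[1:]] + [len(s) - 1]
--     return [s[i] if s[i] == s[j] else f"{s[i]}~{s[j]}" for i, j in zip(starts, ends)]
-- ===== Notes on version B (the rewrite author's own statement) =====
-- stated objective: alternative
-- what changed: B replaces A's single-pass running accumulator with a staged pipeline: it computes the key list, a break-flag list from zipped adjacent keys, extracts run start indices and derives end indices, then formats each (start,end) index pair; A instead threads (current_start, current_end) state through one loop and flushes formatted strings inline.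
import Mathlib
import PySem

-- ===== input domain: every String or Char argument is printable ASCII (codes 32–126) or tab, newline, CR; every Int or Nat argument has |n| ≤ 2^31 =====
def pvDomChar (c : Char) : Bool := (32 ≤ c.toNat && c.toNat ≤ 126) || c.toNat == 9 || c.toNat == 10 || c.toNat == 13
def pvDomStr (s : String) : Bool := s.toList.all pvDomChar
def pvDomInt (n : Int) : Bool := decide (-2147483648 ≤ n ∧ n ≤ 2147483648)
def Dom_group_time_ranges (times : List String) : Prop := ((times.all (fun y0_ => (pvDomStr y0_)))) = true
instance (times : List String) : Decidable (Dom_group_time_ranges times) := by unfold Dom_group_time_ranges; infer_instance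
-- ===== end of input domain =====

-- B is a staged pipeline (keys, break flags, start/end indices, format by index pairs)
-- instead of A's single-pass running accumulator; objective: alternative structure, same cost.

-- int(t.replace(':','')); total with default 0 — Pre_ guarantees the parse succeeds where A evaluates it
def pvKey (t : String) : Int := (PySem.Int.ofStr? (PySem.Str.replace t ":" "")).getD 0

-- ===== PORT A =====
-- A's for-loop over sorted_times[1:] with state (time_ranges, current_start, current_end)
def pvFmtA (a b : String) : String := if a ≠ b then a ++ "~" ++ b else a

def pvALoop : List String → List String → String → String → List String
  | [], acc, cs, ce => acc ++ [pvFmtA cs ce]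
  | t :: ts, acc, cs, ce =>
    if pvKey t - pvKey ce = 100 then pvALoop ts acc cs t
    else pvALoop ts (acc ++ [pvFmtA cs ce]) t t

def group_time_ranges (times : List String) : List String :=
  if times = [] then []
  else
    match PySem.List.sorted times (fun x => x) false with
    | [] => []  -- unreachable: sorted of a nonempty list is nonempty
    | x :: xs => pvALoop xs [] x x

-- ===== PORT B =====
-- s[i] for an index the pipeline produces (always in range, so the default is never used)
def pvGet (s : List String) (i : Int) : String := (PySem.List.pyGet? s i).getD ""

def group_time_ranges_alt (times : List String) : List String :=
  let s := PySem.List.sorted times (fun x => x) false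
  if s.length < 2 then s
  else
    let keys := s.map pvKey
    let flags := true :: (keys.zip keys.tail).map (fun p => decide (p.2 - p.1 ≠ 100))
    let starts := (PySem.List.enumerate flags 0).filterMap (fun p => if p.2 then some p.1 else none)
    let ends := starts.tail.map (fun i => i - 1) ++ [(s.length : Int) - 1]
    (starts.zip ends).map (fun p =>
      if pvGet s p.1 = pvGet s p.2 then pvGet s p.1
      else pvGet s p.1 ++ "~" ++ pvGet s p.2)

-- ===== PRECONDITION & SPEC =====
-- Pre_ excludes exactly the inputs on which Python A raises ValueError: a list of ≥ 2
-- elements one of which is not accepted by int() after stripping ':' (lists of ≤ 1 element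
-- are returned unparsed by A).
def Pre_group_time_ranges (times : List String) : Prop :=
  times.length ≤ 1 ∨ ∀ t ∈ times, (PySem.Int.ofStr? (PySem.Str.replace t ":" "")).isSome = true
instance (times : List String) : Decidable (Pre_group_time_ranges times) := by
  unfold Pre_group_time_ranges; infer_instance

def pvWitness_group_time_ranges : List String := ["08:00", "07:00", "10:00", "09:00", "13:00"]

def Spec_group_time_ranges (times : List String) (out : List String) : Prop := out = group_time_ranges_alt times
instance (times : List String) (out : List String) : Decidable (Spec_group_time_ranges times out) := by unfold Spec_group_time_ranges; infer_instance

-- ===== CLAIM (what is proved, stated in full; the proofs are below) =====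
def Claim_equal_group_time_ranges : Prop := ∀ (times : List String), Dom_group_time_ranges times → Pre_group_time_ranges times → Spec_group_time_ranges times (group_time_ranges times)

-- ===== LEMMAS AND PROOFS =====

-- canonical run decomposition of the sorted list, used as the middle term of the proof
def pvTakeRun : String → List String → String × List String
  | prev, [] => (prev, [])
  | prev, t :: ts => if pvKey t - pvKey prev = 100 then pvTakeRun t ts else (prev, t :: ts)

theorem pvTakeRun_len (p : String) (ts : List String) : (pvTakeRun p ts).2.length ≤ ts.length := by
  induction ts generalizing p with
  | nil => simp [pvTakeRun]
  | cons t ts ih =>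
    simp only [pvTakeRun]
    split
    · exact le_trans (ih t) (Nat.le_succ _)
    · simp

def pvRuns : List String → List (String × String)
  | [] => []
  | x :: xs => (x, (pvTakeRun x xs).1) :: pvRuns (pvTakeRun x xs).2
termination_by xs => xs.length
decreasing_by
  exact Nat.lt_succ_of_le (pvTakeRun_len x xs)

def pvFmtB (p : String × String) : String :=
  if p.1 = p.2 then p.1 else p.1 ++ "~" ++ p.2

theorem pvFmt_eq (a b : String) : pvFmtA a b = pvFmtB (a, b) := by
  by_cases h : a = b <;> simp [pvFmtA, pvFmtB, h]

-- ---- A's side: the accumulator loop produces the formatted runs ----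
theorem pvALoop_eq (ts : List String) : ∀ (acc : List String) (cs ce : String),
    pvALoop ts acc cs ce =
      acc ++ pvFmtA cs (pvTakeRun ce ts).1 :: (pvRuns (pvTakeRun ce ts).2).map pvFmtB := by
  induction ts with
  | nil => intro acc cs ce; simp [pvALoop, pvTakeRun, pvRuns]
  | cons t ts ih =>
    intro acc cs ce
    simp only [pvALoop, pvTakeRun]
    split
    · exact ih acc cs t
    · rw [ih (acc ++ [pvFmtA cs ce]) t t]
      simp [pvRuns, pvFmt_eq]

-- ---- B's side: pipeline pieces ----
-- the break-flag list of port B's pipeline (written exactly as the port computes it)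
def pvDiffs (s : List String) : List Bool :=
  ((s.map pvKey).zip (s.map pvKey).tail).map (fun p => decide (p.2 - p.1 ≠ 100))

-- positions of true flags, as produced by the enumerate/filterMap comprehension
def pvTP (bs : List Bool) (off : Int) : List Int :=
  (PySem.List.enumerate bs off).filterMap (fun p => if p.2 then some p.1 else none)

def pvStarts (s : List String) : List Int := pvTP (true :: pvDiffs s) 0
def pvEnds (s : List String) : List Int :=
  (pvStarts s).tail.map (fun i => i - 1) ++ [(s.length : Int) - 1]
def pvOut (s : List String) : List String :=
  ((pvStarts s).zip (pvEnds s)).map (fun p =>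
    if pvGet s p.1 = pvGet s p.2 then pvGet s p.1
    else pvGet s p.1 ++ "~" ++ pvGet s p.2)

theorem pvTP_nil (off : Int) : pvTP [] off = [] := by simp [pvTP, PySem.List.enumerate_nil]

theorem pvTP_cons (b : Bool) (bs : List Bool) (off : Int) :
    pvTP (b :: bs) off = if b then off :: pvTP bs (off + 1) else pvTP bs (off + 1) := by
  by_cases hb : b = true <;> simp [pvTP, PySem.List.enumerate_cons, hb]

theorem pvTP_replicate_false (k : Nat) (l : List Bool) (off : Int) :
    pvTP (List.replicate k false ++ l) off = pvTP l (off + k) := by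
  induction k generalizing off with
  | zero => norm_num
  | succ n ih =>
    rw [List.replicate_succ, List.cons_append, pvTP_cons]
    rw [if_neg (by decide)]
    rw [ih]
    congr 1
    push_cast
    ring

theorem pvTP_shift (bs : List Bool) (a c : Int) :
    pvTP bs (a + c) = (pvTP bs a).map (fun i => i + c) := by
  induction bs generalizing a with
  | nil => simp [pvTP_nil]
  | cons b bs ih =>
    rw [pvTP_cons, pvTP_cons]
    have h : a + c + 1 = (a + 1) + c := by ring
    by_cases hb : b = true <;> simp [hb, h, ih (a + 1)]

theorem pvTP_mem_le (bs : List Bool) (off : Int) : ∀ i ∈ pvTP bs off, off ≤ i := by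
  induction bs generalizing off with
  | nil => simp [pvTP_nil]
  | cons b bs ih =>
    intro i hi
    rw [pvTP_cons] at hi
    have hstep : ∀ j ∈ pvTP bs (off + 1), off ≤ j := fun j hj => by
      have := ih (off + 1) j hj; omega
    by_cases hb : b = true
    · rw [if_pos hb] at hi
      rcases List.mem_cons.mp hi with h | h
      · omega
      · exact hstep i h
    · rw [if_neg hb] at hi
      exact hstep i hi

-- structure of pvTakeRun: it consumes a prefix of k elements whose flags are all false
theorem pvTakeRun_struct (xs : List String) : ∀ (x : String),
    pvDiffs (x :: xs) =
      List.replicate (xs.length - (pvTakeRun x xs).2.length) false ++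
        (match (pvTakeRun x xs).2 with | [] => [] | _ :: _ => true :: pvDiffs (pvTakeRun x xs).2) ∧
    (x :: xs).drop (xs.length - (pvTakeRun x xs).2.length) = (pvTakeRun x xs).1 :: (pvTakeRun x xs).2 := by
  induction xs with
  | nil => intro x; simp [pvTakeRun, pvDiffs]
  | cons t ts ih =>
    intro x
    by_cases hc : pvKey t - pvKey x = 100
    · have hlen := pvTakeRun_len t ts
      have hk : (t :: ts).length - (pvTakeRun x (t :: ts)).2.length
          = (ts.length - (pvTakeRun t ts).2.length) + 1 := by
        simp only [pvTakeRun, if_pos hc]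
        simp only [List.length_cons]
        omega
      rcases ih t with ⟨h1, h2⟩
      constructor
      · have : pvDiffs (x :: t :: ts) = false :: pvDiffs (t :: ts) := by
          simp [pvDiffs, hc]
        rw [this, hk, h1]
        simp only [pvTakeRun, if_pos hc]
        rw [List.replicate_succ, List.cons_append]
      · rw [hk]
        simp only [pvTakeRun, if_pos hc]
        simpa using h2
    · have hk : (t :: ts).length - (pvTakeRun x (t :: ts)).2.length = 0 := by
        simp only [pvTakeRun, if_neg hc]; omega
      constructor
      · rw [hk]
        simp only [pvTakeRun, if_neg hc]
        simp [pvDiffs, hc]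
      · rw [hk]
        simp only [pvTakeRun, if_neg hc]
        simp

theorem pvGet_natCast (s : List String) (n : Nat) : pvGet s (n : Int) = s[n]?.getD "" := by
  simp [pvGet, PySem.List.pyGet?_natCast]

-- ---- B's pipeline equals the formatted runs ----
theorem pvOut_eq (s : List String) (hne : s ≠ []) : pvOut s = (pvRuns s).map pvFmtB := by
  match s with
  | x :: xs =>
    rcases pvTakeRun_struct xs x with ⟨hdiff, hdrop⟩
    set l := (pvTakeRun x xs).1 with hl
    set rest := (pvTakeRun x xs).2 with hrest
    set k := xs.length - rest.length with hkdef
    have hlenrest : rest.length ≤ xs.length := pvTakeRun_len x xs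
    have hlen : (x :: xs).length = k + 1 + rest.length := by
      simp only [List.length_cons]; omega
    -- index facts from the drop characterisation
    have hget0 : pvGet (x :: xs) 0 = x := by
      have := pvGet_natCast (x :: xs) 0; simpa using this
    have hgetk : pvGet (x :: xs) (k : Int) = l := by
      rw [pvGet_natCast]
      have : ((x :: xs).drop k)[0]? = some l := by rw [hdrop]; simp
      rw [List.getElem?_drop] at this
      simp at this
      simp [this]
    have hgetshift : ∀ (i : Int), 0 ≤ i →
        pvGet (x :: xs) (i + (k + 1 : Nat)) = pvGet rest i := by
      intro i hi
      obtain ⟨m, rfl⟩ := Int.eq_ofNat_of_zero_le hi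
      have hcast : ((m : Int) + ((k + 1 : Nat) : Int)) = ((m + (k + 1) : Nat) : Int) := by push_cast; ring
      rw [hcast, pvGet_natCast, pvGet_natCast]
      have hdrop1 : (x :: xs).drop (k + 1) = rest := by
        have : ((x :: xs).drop k).drop 1 = rest := by rw [hdrop]; simp
        rwa [List.drop_drop] at this
      have : rest[m]? = (x :: xs)[(k + 1) + m]? := by
        rw [← hdrop1, List.getElem?_drop]
      rw [this, Nat.add_comm m (k + 1)]
    -- starts
    have hstarts : pvStarts (x :: xs) = 0 :: pvTP (pvDiffs (x :: xs)) 1 := by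
      rw [pvStarts, pvTP_cons]; simp
    have hruns : pvRuns (x :: xs) = (x, l) :: pvRuns rest := by
      rw [pvRuns]
    by_cases hrnil : rest = []
    · -- single run covering everything
      rw [hrnil] at hdiff hlen
      have hd : pvDiffs (x :: xs) = List.replicate k false := by
        rw [hdiff]; simp
      have hs : pvStarts (x :: xs) = [0] := by
        rw [hstarts, hd, ← List.append_nil (List.replicate k false), pvTP_replicate_false, pvTP_nil]
      have he : pvEnds (x :: xs) = [(k : Int)] := by
        rw [pvEnds, hs, hlen]
        simp
      rw [pvOut, hs, he, hruns, hrnil, pvRuns]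
      simp only [List.zip_cons_cons, List.zip_nil_right, List.map_cons, List.map_nil]
      rw [hget0, hgetk]
      simp [pvFmtB]
    · -- first run, then recurse on rest
      obtain ⟨y, ys, hrestc⟩ := List.exists_cons_of_ne_nil hrnil
      have hd : pvDiffs (x :: xs) = List.replicate k false ++ true :: pvDiffs rest := by
        rw [hdiff, hrestc]
      have htp : pvTP (pvDiffs (x :: xs)) 1 = (pvStarts rest).map (fun i : Int => i + ((k : Int) + 1)) := by
        rw [hd, pvTP_replicate_false, pvTP_cons]
        rw [pvStarts, pvTP_cons]
        simp only [if_true, List.map_cons]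
        congr 1
        · omega
        · rw [show (1 + (k : Int) + 1) = (0 + 1) + ((k : Int) + 1) by ring, pvTP_shift]
      have hs : pvStarts (x :: xs) = 0 :: (pvStarts rest).map (fun i : Int => i + ((k : Int) + 1)) := by
        rw [hstarts, htp]
      have hsrest : pvStarts rest = 0 :: pvTP (pvDiffs rest) 1 := by
        rw [pvStarts, pvTP_cons]; simp
      have he : pvEnds (x :: xs) = (k : Int) :: (pvEnds rest).map (fun i : Int => i + ((k : Int) + 1)) := by
        rw [pvEnds, hs]
        simp only [List.tail_cons]
        rw [pvEnds, hsrest]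
        simp only [List.map_cons, List.map_append, List.map_map, List.tail_cons]
        rw [List.cons_append]
        congr 1
        · ring_nf
        · congr 1
          · apply List.map_eq_map_iff.mpr
            intro a _
            simp only [Function.comp_apply]
            ring
          · simp only [List.map_nil, hlen]
            congr 2
            push_cast
            ring
      rw [pvOut, hs, he]
      simp only [List.zip_cons_cons, List.map_cons]
      rw [hget0, hgetk]
      have hzip : ((pvStarts rest).map (fun i : Int => i + ((k : Int) + 1))).zip ((pvEnds rest).map (fun i : Int => i + ((k : Int) + 1)))
          = ((pvStarts rest).zip (pvEnds rest)).map (Prod.map (fun i : Int => i + ((k : Int) + 1)) (fun i : Int => i + ((k : Int) + 1))) :=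
        List.zip_map
      rw [hzip, List.map_map]
      have hcong : (((pvStarts rest).zip (pvEnds rest)).map
            ((fun p : Int × Int =>
              if pvGet (x :: xs) p.1 = pvGet (x :: xs) p.2 then pvGet (x :: xs) p.1
              else pvGet (x :: xs) p.1 ++ "~" ++ pvGet (x :: xs) p.2) ∘
             Prod.map (fun i : Int => i + ((k : Int) + 1)) (fun i : Int => i + ((k : Int) + 1))))
          = pvOut rest := by
        rw [pvOut]
        apply List.map_eq_map_iff.mpr
        intro p hp
        rcases List.of_mem_zip hp with ⟨hp1, hp2⟩
        have h1 : 0 ≤ p.1 := by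
          have := pvTP_mem_le _ _ _ hp1; simpa [pvStarts] using this
        have h2 : 0 ≤ p.2 := by
          rw [pvEnds] at hp2
          rcases List.mem_append.mp hp2 with h | h
          · rcases List.mem_map.mp h with ⟨j, hj, hEq⟩
            rw [hsrest] at hj
            simp only [List.tail_cons] at hj
            have := pvTP_mem_le _ _ _ hj; omega
          · simp only [List.mem_singleton] at h
            have : rest.length ≠ 0 := by rw [hrestc]; simp
            omega
        simp only [Function.comp_apply, Prod.map_fst, Prod.map_snd]
        have e1 : pvGet (x :: xs) (p.1 + ((k : Int) + 1)) = pvGet rest p.1 := by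
          have := hgetshift p.1 h1; push_cast at this ⊢; rw [← this]
        have e2 : pvGet (x :: xs) (p.2 + ((k : Int) + 1)) = pvGet rest p.2 := by
          have := hgetshift p.2 h2; push_cast at this ⊢; rw [← this]
        rw [e1, e2]
      rw [hcong, hruns]
      rw [pvOut_eq rest hrnil]
      simp [pvFmtB]
termination_by s.length
decreasing_by
  have := pvTakeRun_len x xs
  simp only [List.length_cons]
  omega

-- ===== VERDICT (by name: the statement is the Claim_ definition above) =====
theorem group_time_ranges_spec : Claim_equal_group_time_ranges := by
  intro times _ _
  unfold Spec_group_time_ranges group_time_ranges group_time_ranges_alt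
  by_cases h : times = []
  · simp [h, PySem.List.sorted]
  · simp only [h, if_false]
    rcases hs : PySem.List.sorted times (fun x => x) false with _ | ⟨x, xs⟩
    · rw [PySem.List.sorted_eq_nil_iff] at hs; exact absurd hs h
    · show pvALoop xs [] x x = _
      rw [pvALoop_eq, List.nil_append]
      rcases hxs : xs with _ | ⟨y, ys⟩
      · -- singleton sorted list: A emits [x], B takes the length-1 branch
        simp only [List.length_cons, List.length_nil]
        rw [if_pos (by omega)]
        simp [pvTakeRun, pvRuns, pvFmtA]
      · rw [if_neg (by simp)]
        have hout := pvOut_eq (x :: y :: ys) (by simp)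
        rw [pvRuns] at hout
        rw [← hxs] at hout ⊢
        rw [List.map_cons] at hout
        rw [pvFmt_eq, ← hout]
        unfold pvOut pvStarts pvEnds pvTP pvDiffs
        rfl
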